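-- pv_equiv track=rewrite | github.com/HVP1998/python_learning | chaos folder/ShellSort.py | func_recrusion
-- ===== SOURCE A (Python) =====
-- def func_recrusion(nums:list,d:int)->list:
--     if(len(nums)<=1):return nums
--     if(d==0):return nums
--     for i in range(0,d):
--         for j in range(i,len(nums)-d,d):
--             if(nums[j]>nums[j+d]):
--                 nums[j]=nums[j]+nums[j+d]
--                 nums[j+d]=nums[j]-nums[j+d]
--                 nums[j]=nums[j]-nums[j+d]
--     nums=func_recrusion(nums,int(d/2))
--     return nums
-- ===== SOURCE B (Python) =====
-- def func_recrusion(nums: list, d: int) -> list: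
--     # One flat ascending compare-swap pass per gap level: the per-residue chains the
--     # nested loops walk are disjoint, so a single j-loop gives the same result.
--     # Gaps are halved iteratively. (Like A, reorders nums in place and returns it.)
--     n = len(nums)
--     if n <= 1:
--         return nums
--     while d > 0:
--         for j in range(n - d):
--             if nums[j] > nums[j + d]:
--                 nums[j], nums[j + d] = nums[j + d], nums[j]
--         d //= 2
--     return nums
-- ===== Notes on version B (the rewrite author's own statement) =====
-- stated objective: alternative
-- what changed: A's two nested per-residue loops per gap level are collapsed into one flat ascending compare-swap pass (the residue chains are disjoint, so the traversal order change cannot affect the result), the three-line arithmetic swap becomes a tuple swap, and the tail recursion over halving gaps becomes an iterative while loop.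
import Mathlib
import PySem

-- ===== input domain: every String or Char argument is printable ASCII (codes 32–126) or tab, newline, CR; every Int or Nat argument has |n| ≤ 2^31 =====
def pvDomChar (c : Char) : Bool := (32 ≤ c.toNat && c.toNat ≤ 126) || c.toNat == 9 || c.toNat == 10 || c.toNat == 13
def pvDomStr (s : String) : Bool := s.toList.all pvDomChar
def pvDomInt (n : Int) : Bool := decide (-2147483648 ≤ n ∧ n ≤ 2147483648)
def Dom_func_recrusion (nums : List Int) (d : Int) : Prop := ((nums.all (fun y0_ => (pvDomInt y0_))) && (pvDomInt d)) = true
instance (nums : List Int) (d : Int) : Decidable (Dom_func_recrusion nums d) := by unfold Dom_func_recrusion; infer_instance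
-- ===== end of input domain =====

-- B replaces A's nested per-residue gap passes and tail recursion by ONE flat ascending
-- compare-swap pass per gap level (the residue chains are disjoint, so the order change
-- is invisible in the result) inside an iterative halving loop.
-- Both Pythons mutate nums in place; the claim is about the returned value.

-- ===== PORT A =====
-- body of A's innermost loop: the three-line arithmetic swap
def stepA (d : Int) (ns : List Int) (j : Int) : List Int :=
  if PySem.List.pyGetD ns j 0 > PySem.List.pyGetD ns (j + d) 0 then
    let ns1 := ns.set j.toNat (PySem.List.pyGetD ns j 0 + PySem.List.pyGetD ns (j + d) 0)
    let ns2 := ns1.set (j + d).toNat (PySem.List.pyGetD ns1 j 0 - PySem.List.pyGetD ns1 (j + d) 0)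
    ns2.set j.toNat (PySem.List.pyGetD ns2 j 0 - PySem.List.pyGetD ns2 (j + d) 0)
  else ns

-- A's two nested for-loops (len(nums) re-read from the current list, as in the Python)
def gapPass (nums : List Int) (d : Int) : List Int :=
  (PySem.List.pyRange 0 d 1).foldl
    (fun ns i => (PySem.List.pyRange i ((ns.length : Int) - d) d).foldl (stepA d) ns) nums

def func_recrusion (nums : List Int) (d : Int) : List Int :=
  if nums.length ≤ 1 then nums
  else if d = 0 then nums
  else func_recrusion (gapPass nums d) (PySem.Int.truncdiv d 2)
termination_by d.natAbs
decreasing_by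
  have h2 : Int.natAbs 2 = 2 := rfl
  simp only [PySem.Int.truncdiv, Int.natAbs_tdiv, h2]
  exact Nat.div_lt_self (by omega) (by omega)

-- ===== PORT B =====
-- body of B's single loop: the tuple swap
def stepB (d : Int) (ns : List Int) (j : Int) : List Int :=
  if PySem.List.pyGetD ns j 0 > PySem.List.pyGetD ns (j + d) 0 then
    (ns.set j.toNat (PySem.List.pyGetD ns (j + d) 0)).set (j + d).toNat (PySem.List.pyGetD ns j 0)
  else ns

-- B's 'for j in range(n - d)'
def flatPass (nums : List Int) (d : Int) : List Int :=
  (PySem.List.pyRange 0 ((nums.length : Int) - d) 1).foldl (stepB d) nums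

-- B's 'while d > 0' loop
def halveLoop (nums : List Int) (d : Int) : List Int :=
  if 0 < d then halveLoop (flatPass nums d) (PySem.Int.floordiv d 2) else nums
termination_by d.toNat
decreasing_by
  rename_i hd
  have : PySem.Int.floordiv d 2 = d / 2 :=
    PySem.Int.floordiv_eq_ediv_of_pos (by norm_num)
  rw [this]; omega

def func_recrusion_alt (nums : List Int) (d : Int) : List Int :=
  if nums.length ≤ 1 then nums
  else halveLoop nums d

-- ===== PRECONDITION & SPEC =====
def Spec_func_recrusion (nums : List Int) (d : Int) (out : List Int) : Prop := out = func_recrusion_alt nums d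
instance (nums : List Int) (d : Int) (out : List Int) : Decidable (Spec_func_recrusion nums d out) := by unfold Spec_func_recrusion; infer_instance

-- ===== CLAIM (what is proved, stated in full; the proofs are below) =====
def Claim_equal_func_recrusion : Prop := ∀ (nums : List Int) (d : Int), Dom_func_recrusion nums d → Spec_func_recrusion nums d (func_recrusion nums d)

-- ===== LEMMAS AND PROOFS =====

theorem length_stepA (d : Int) (ns : List Int) (j : Int) : (stepA d ns j).length = ns.length := by
  unfold stepA; split <;> simp

theorem length_stepB (d : Int) (ns : List Int) (j : Int) : (stepB d ns j).length = ns.length := by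
  unfold stepB; split <;> simp

theorem length_foldl_inv {α : Type} (f : List Int → α → List Int)
    (hf : ∀ acc x, (f acc x).length = acc.length) :
    ∀ (l : List α) (init : List Int), (l.foldl f init).length = init.length := by
  intro l
  induction l with
  | nil => intro init; rfl
  | cons x xs ih => intro init; simp [List.foldl, ih, hf]

theorem gapPass_length (nums : List Int) (d : Int) :
    (gapPass nums d).length = nums.length := by
  unfold gapPass
  apply length_foldl_inv
  intro acc i
  exact length_foldl_inv _ (length_stepA d) _ acc

-- reading an untouched (nonnegative) position through a set
theorem pyGetD_set_ne (ns : List Int) (k : Nat) (v x : Int) (hx : 0 ≤ x) (hne : x.toNat ≠ k) :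
    PySem.List.pyGetD (ns.set k v) x 0 = PySem.List.pyGetD ns x 0 := by
  unfold PySem.List.pyGetD PySem.List.pyGet? PySem.List.pyIdx?
  simp only [List.length_set, if_pos hx]
  split
  · simp [List.getElem?_set_ne (Ne.symm hne)]
  · rfl

-- writes at four pairwise-foreign positions commute
theorem set4_comm (ns : List Int) (p q r s : Nat) (a b a' b' : Int)
    (hpr : p ≠ r) (hps : p ≠ s) (hqr : q ≠ r) (hqs : q ≠ s) :
    (((ns.set p b).set q a).set r b').set s a' = (((ns.set r b').set s a').set p b).set q a := by
  apply List.ext_getElem?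
  intro m
  simp only [List.getElem?_set, List.length_set]
  split_ifs <;> first | rfl | omega

-- two stepB's on different residue chains commute
theorem stepB_comm (d : Int) (ns : List Int) (j j' : Int)
    (hd : 0 < d) (hj : 0 ≤ j) (hj' : 0 ≤ j') (hres : j % d ≠ j' % d) :
    stepB d (stepB d ns j) j' = stepB d (stepB d ns j') j := by
  have hadd : ∀ x : Int, (x + d) % d = x % d := by
    intro x
    have h := Int.add_mul_emod_self_left x d 1
    rw [mul_one] at h
    exact h
  have e1 : j ≠ j' := fun h => hres (by rw [h])
  have e2 : j ≠ j' + d := fun h => hres (by rw [h, hadd])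
  have e3 : j + d ≠ j' := fun h => hres (by rw [← h, hadd])
  have e4 : j + d ≠ j' + d := by omega
  have R1 : PySem.List.pyGetD ((ns.set j.toNat (PySem.List.pyGetD ns (j + d) 0)).set (j + d).toNat (PySem.List.pyGetD ns j 0)) j' 0 = PySem.List.pyGetD ns j' 0 := by
    rw [pyGetD_set_ne _ _ _ _ hj' (by omega), pyGetD_set_ne _ _ _ _ hj' (by omega)]
  have R2 : PySem.List.pyGetD ((ns.set j.toNat (PySem.List.pyGetD ns (j + d) 0)).set (j + d).toNat (PySem.List.pyGetD ns j 0)) (j' + d) 0 = PySem.List.pyGetD ns (j' + d) 0 := by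
    rw [pyGetD_set_ne _ _ _ _ (by omega : (0:Int) ≤ j' + d) (by omega), pyGetD_set_ne _ _ _ _ (by omega : (0:Int) ≤ j' + d) (by omega)]
  have R3 : PySem.List.pyGetD ((ns.set j'.toNat (PySem.List.pyGetD ns (j' + d) 0)).set (j' + d).toNat (PySem.List.pyGetD ns j' 0)) j 0 = PySem.List.pyGetD ns j 0 := by
    rw [pyGetD_set_ne _ _ _ _ hj (by omega), pyGetD_set_ne _ _ _ _ hj (by omega)]
  have R4 : PySem.List.pyGetD ((ns.set j'.toNat (PySem.List.pyGetD ns (j' + d) 0)).set (j' + d).toNat (PySem.List.pyGetD ns j' 0)) (j + d) 0 = PySem.List.pyGetD ns (j + d) 0 := by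
    rw [pyGetD_set_ne _ _ _ _ (by omega : (0:Int) ≤ j + d) (by omega), pyGetD_set_ne _ _ _ _ (by omega : (0:Int) ≤ j + d) (by omega)]
  by_cases cj : PySem.List.pyGetD ns j 0 > PySem.List.pyGetD ns (j + d) 0 <;>
    by_cases cj' : PySem.List.pyGetD ns j' 0 > PySem.List.pyGetD ns (j' + d) 0
  · simp only [stepB, if_pos cj, if_pos cj', R1, R2, R3, R4]
    exact set4_comm ns _ _ _ _ _ _ _ _ (by omega) (by omega) (by omega) (by omega)
  · simp only [stepB, if_pos cj, if_neg cj', R1, R2]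
  · simp only [stepB, if_neg cj, if_pos cj', R3, R4]
  · simp only [stepB, if_neg cj, if_neg cj']

-- the arithmetic three-line swap equals the tuple swap on in-range indices
theorem stepA_eq_stepB (d : Int) (ns : List Int) (j : Int)
    (hd : 0 < d) (hj : 0 ≤ j) (hlt : j + d < (ns.length : Int)) :
    stepA d ns j = stepB d ns j := by
  have hjlt : j.toNat < ns.length := by omega
  have hklt : (j + d).toNat < ns.length := by omega
  have hne : j.toNat ≠ (j + d).toNat := by omega
  have g1 : PySem.List.pyGetD ns j 0 = ns[j.toNat] :=
    PySem.List.pyGetD_eq_getElem ns 0 hj (by omega)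
  have g2 : PySem.List.pyGetD ns (j + d) 0 = ns[(j + d).toNat] :=
    PySem.List.pyGetD_eq_getElem ns 0 (by omega) (by omega)
  set a := ns[j.toNat] with ha
  set b := ns[(j + d).toNat] with hb
  have h1 : PySem.List.pyGetD (ns.set j.toNat (a + b)) j 0 = a + b := by
    rw [PySem.List.pyGetD_eq_getElem _ 0 hj (by simp; omega)]
    simp [List.getElem_set_self]
  have h2 : PySem.List.pyGetD (ns.set j.toNat (a + b)) (j + d) 0 = b := by
    rw [PySem.List.pyGetD_eq_getElem _ 0 (by omega) (by simp; omega)]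
    rw [List.getElem_set_ne hne]
  have h3 : PySem.List.pyGetD ((ns.set j.toNat (a + b)).set (j + d).toNat (a + b - b)) j 0 = a + b := by
    rw [PySem.List.pyGetD_eq_getElem _ 0 hj (by simp; omega)]
    rw [List.getElem_set_ne (Ne.symm hne), List.getElem_set_self]
  have h4 : PySem.List.pyGetD ((ns.set j.toNat (a + b)).set (j + d).toNat (a + b - b)) (j + d) 0 = a + b - b := by
    rw [PySem.List.pyGetD_eq_getElem _ 0 (by omega) (by simp; omega)]
    rw [List.getElem_set_self]
  simp only [stepA, stepB, g1, g2]
  split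
  · rw [h1, h2, h3, h4]
    have e1 : a + b - b = a := by ring
    rw [e1]
    have e2 : a + b - a = b := by ring
    rw [e2, List.set_comm _ _ (Ne.symm hne), List.set_set]
  · rfl

-- move a commuting element to the front of a fold
theorem foldl_pull_front {S α : Type} (f : S → α → S) (a : α) :
    ∀ (l r : List α) (s : S),
      (∀ s' b, b ∈ l → f (f s' b) a = f (f s' a) b) →
      (l ++ a :: r).foldl f s = (l ++ r).foldl f (f s a) := by
  intro l
  induction l with
  | nil => intro r s _; rfl
  | cons x t ih =>
      intro r s hc
      simp only [List.cons_append, List.foldl_cons]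
      rw [ih r (f s x) (fun s' b hb => hc s' b (List.mem_cons_of_mem _ hb)),
          hc s x List.mem_cons_self]

-- a fold may be regrouped into its key-fibers when cross-key steps commute
theorem foldl_fiber {S α K : Type} [DecidableEq K] (f : S → α → S) (key : α → K)
    (ks : List K) (hks : ks.Nodup) :
    ∀ (l : List α) (s : S),
      (∀ x ∈ l, key x ∈ ks) →
      (∀ s' a b, a ∈ l → b ∈ l → key a ≠ key b → f (f s' a) b = f (f s' b) a) →
      (ks.flatMap (fun k => l.filter (fun x => decide (key x = k)))).foldl f s = l.foldl f s := by
  intro l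
  induction l with
  | nil =>
      intro s _ _
      rw [show (List.flatMap (fun k => (List.filter (fun x => decide (key x = k)) ([] : List α))) ks) = [] by simp]
  | cons a t ih =>
      intro s hcov hcomm
      obtain ⟨p, q, hks_eq⟩ := List.append_of_mem (hcov a List.mem_cons_self)
      have hnd := hks
      rw [hks_eq] at hnd
      simp only [List.nodup_append, List.nodup_cons] at hnd
      have hnp : key a ∉ p := fun h => (hnd.2.2 _ h _ List.mem_cons_self) rfl
      have hnq : key a ∉ q := hnd.2.1.1
      have hFp : ∀ k ∈ p, (a :: t).filter (fun x => decide (key x = k)) = t.filter (fun x => decide (key x = k)) := by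
        intro k hk
        rw [List.filter_cons_of_neg]
        simp only [decide_eq_true_eq]
        intro h; exact hnp (h ▸ hk)
      have hFq : ∀ k ∈ q, (a :: t).filter (fun x => decide (key x = k)) = t.filter (fun x => decide (key x = k)) := by
        intro k hk
        rw [List.filter_cons_of_neg]
        simp only [decide_eq_true_eq]
        intro h; exact hnq (h ▸ hk)
      have hFa : (a :: t).filter (fun x => decide (key x = key a)) = a :: t.filter (fun x => decide (key x = key a)) := by
        rw [List.filter_cons_of_pos (by simp)]
      rw [hks_eq, List.flatMap_append, List.flatMap_cons,
          List.flatMap_congr hFp, List.flatMap_congr hFq, hFa]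
      have hshape : p.flatMap (fun k => t.filter (fun x => decide (key x = k))) ++
          ((a :: t.filter (fun x => decide (key x = key a))) ++
            q.flatMap (fun k => t.filter (fun x => decide (key x = k)))) =
          p.flatMap (fun k => t.filter (fun x => decide (key x = k))) ++
          a :: (t.filter (fun x => decide (key x = key a)) ++
            q.flatMap (fun k => t.filter (fun x => decide (key x = k)))) := by
        simp
      rw [hshape]
      rw [foldl_pull_front f a _ _ s ?hc]
      case hc =>
        intro s' b hb
        rw [List.mem_flatMap] at hb
        obtain ⟨k, hkp, hbf⟩ := hb
        have hbt : b ∈ t := List.mem_of_mem_filter hbf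
        have hkey : key b = k := by simpa using List.of_mem_filter hbf
        exact hcomm s' b a (List.mem_cons_of_mem _ hbt) List.mem_cons_self
          (by rw [hkey]; intro h; exact hnp (h ▸ hkp))
      rw [← List.flatMap_cons (f := fun k => t.filter (fun x => decide (key x = k))), ← List.flatMap_append, ← hks_eq]
      rw [List.foldl_cons]
      exact ih (f s a)
        (fun x hx => hcov x (List.mem_cons_of_mem _ hx))
        (fun s' x y hx hy => hcomm s' x y (List.mem_cons_of_mem _ hx) (List.mem_cons_of_mem _ hy))

-- residue characterisation: the fiber of range(0,m) at residue i is range(i,m,d)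
theorem fiber_eq (d i m : Int) (hd : 0 < d) (hi0 : 0 ≤ i) (hid : i < d) :
    (PySem.List.pyRange 0 m 1).filter (fun x => decide (x % d = i)) = PySem.List.pyRange i m d := by
  have hmem : ∀ x : Int, x ∈ (PySem.List.pyRange 0 m 1).filter (fun x => decide (x % d = i)) ↔
      x ∈ PySem.List.pyRange i m d := by
    intro x
    rw [List.mem_filter, PySem.List.mem_pyRange_one, PySem.List.mem_pyRange_iff_of_pos hd]
    simp only [decide_eq_true_eq]
    constructor
    · rintro ⟨⟨hx0, hxm⟩, hmod⟩
      have hdm := Int.mul_ediv_add_emod x d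
      have hq0 : 0 ≤ x / d := Int.ediv_nonneg hx0 (le_of_lt hd)
      have hq : 0 ≤ d * (x / d) := mul_nonneg (le_of_lt hd) hq0
      refine ⟨by omega, hxm, ⟨x / d, by omega⟩⟩
    · rintro ⟨hix, hxm, q, hq⟩
      have hq0 : 0 ≤ d * q := by omega
      have hqn : 0 ≤ q := (mul_nonneg_iff_of_pos_left hd).mp hq0
      have hx : x = i + d * q := by omega
      refine ⟨⟨by omega, hxm⟩, ?_⟩
      rw [hx, Int.add_mul_emod_self_left, Int.emod_eq_of_lt hi0 hid]
  have nd1 : ((PySem.List.pyRange 0 m 1).filter (fun x => decide (x % d = i))).Nodup :=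
    (PySem.List.nodup_pyRange_one 0 m).filter _
  have hinj : Function.Injective (fun k : Nat => i + d * (k : Int)) := by
    intro k1 k2 h
    simp only at h
    have : (k1 : Int) = k2 := mul_left_cancel₀ (ne_of_gt hd) (by omega)
    exact_mod_cast this
  have nd2 : (PySem.List.pyRange i m d).Nodup := by
    rw [PySem.List.pyRange_of_pos i m hd]
    exact (List.nodup_range).map hinj
  have pw2 : (PySem.List.pyRange i m d).Pairwise (· < ·) := by
    rw [PySem.List.pyRange_of_pos i m hd]
    rw [List.pairwise_map]
    exact List.pairwise_lt_range.imp (fun {a b} h => by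
      have hab : (a : Int) < (b : Int) := by exact_mod_cast h
      have := mul_lt_mul_of_pos_left hab hd
      omega)
  have pw1 : ((PySem.List.pyRange 0 m 1).filter (fun x => decide (x % d = i))).Pairwise (· < ·) :=
    (PySem.List.pairwise_lt_pyRange_one 0 m).filter _
  exact List.Perm.eq_of_pairwise (le := (· ≤ ·))
    (fun a b _ _ h1 h2 => le_antisymm h1 h2)
    (pw1.imp le_of_lt) (pw2.imp le_of_lt)
    ((List.perm_ext_iff_of_nodup nd1 nd2).mpr hmem)

-- A's inner loop, with len(nums) frozen to n' and stepA replaced by stepB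
theorem inner_AB (d n' : Int) :
    ∀ (L : List Int) (ns : List Int), (ns.length : Int) = n' → 0 < d →
      (∀ j ∈ L, 0 ≤ j ∧ j + d < n') →
      L.foldl (stepA d) ns = L.foldl (stepB d) ns := by
  intro L
  induction L with
  | nil => intro ns _ _ _; rfl
  | cons j t ih =>
      intro ns hlen hd hb
      obtain ⟨hj0, hjd⟩ := hb j List.mem_cons_self
      simp only [List.foldl_cons]
      rw [stepA_eq_stepB d ns j hd hj0 (by omega)]
      exact ih _ (by rw [length_stepB]; exact hlen) hd
        (fun x hx => hb x (List.mem_cons_of_mem _ hx))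

-- A's outer loop: freeze the re-read length and swap in stepB
theorem outer_AB (d n' : Int) (hd : 0 < d) :
    ∀ (L : List Int) (ns : List Int), (ns.length : Int) = n' →
      (∀ i ∈ L, 0 ≤ i) →
      L.foldl (fun ns i => (PySem.List.pyRange i ((ns.length : Int) - d) d).foldl (stepA d) ns) ns =
      L.foldl (fun ns i => (PySem.List.pyRange i (n' - d) d).foldl (stepB d) ns) ns := by
  intro L
  induction L with
  | nil => intro ns _ _; rfl
  | cons i t ih =>
      intro ns hlen hpos
      simp only [List.foldl_cons]
      rw [hlen]
      rw [inner_AB d n' _ ns hlen hd (fun j hj => by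
        have := (PySem.List.mem_pyRange_iff_of_pos hd j).mp hj
        have hi0 := hpos i List.mem_cons_self
        exact ⟨by omega, by omega⟩)]
      exact ih _ (by rw [length_foldl_inv _ (length_stepB d)]; exact hlen)
        (fun x hx => hpos x (List.mem_cons_of_mem _ hx))

-- a loop of loops is a loop over the concatenation
theorem foldl_nested_flatMap {S α β : Type} (f : S → β → S) (g : α → List β) :
    ∀ (L : List α) (s : S),
      L.foldl (fun s i => (g i).foldl f s) s = (L.flatMap g).foldl f s := by
  intro L
  induction L with
  | nil => intro s; rfl
  | cons a t ih => intro s; simp [List.foldl, ih, List.flatMap_cons, List.foldl_append]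

-- the whole nested gap pass of A equals the flat pass of B
theorem gapPass_eq_flatPass (nums : List Int) (d : Int) (hd : 0 < d) :
    gapPass nums d = flatPass nums d := by
  unfold gapPass
  rw [outer_AB d (nums.length : Int) hd _ nums rfl
        (fun i hi => (PySem.List.mem_pyRange_one.mp hi).1)]
  rw [foldl_nested_flatMap (stepB d) (fun i => PySem.List.pyRange i ((nums.length : Int) - d) d)]
  rw [List.flatMap_congr (g := fun i =>
        (PySem.List.pyRange 0 ((nums.length : Int) - d) 1).filter (fun x => decide (x % d = i)))
      (fun i hi => by
        obtain ⟨hi0, hid⟩ := PySem.List.mem_pyRange_one.mp hi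
        exact (fiber_eq d i ((nums.length : Int) - d) hd hi0 hid).symm)]
  rw [foldl_fiber (stepB d) (fun x => x % d) (PySem.List.pyRange 0 d 1)
        (PySem.List.nodup_pyRange_one 0 d) _ nums
        (fun x hx => by
          obtain ⟨hx0, _⟩ := PySem.List.mem_pyRange_one.mp hx
          rw [PySem.List.mem_pyRange_one]
          exact ⟨Int.emod_nonneg x (ne_of_gt hd), Int.emod_lt_of_pos x hd⟩)
        (fun s' a b ha hb hne => by
          obtain ⟨ha0, _⟩ := PySem.List.mem_pyRange_one.mp ha
          obtain ⟨hb0, _⟩ := PySem.List.mem_pyRange_one.mp hb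
          exact stepB_comm d s' a b hd ha0 hb0 hne)]
  rfl

-- with a nonpositive gap every pass of A is empty and the recursion only halves d to 0
theorem A_nonpos : ∀ (nums : List Int) (d : Int), d ≤ 0 → func_recrusion nums d = nums := by
  intro nums d
  induction nums, d using func_recrusion.induct with
  | case1 nums d h => intro _; rw [func_recrusion]; simp [h]
  | case2 nums d => intro _; rw [func_recrusion]; simp
  | case3 nums d h1 h0 ih =>
      intro hle
      rw [func_recrusion, if_neg h1, if_neg h0]
      have hg : gapPass nums d = nums := by
        unfold gapPass
        rw [PySem.List.pyRange_one_eq_nil hle]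
        rfl
      rw [hg] at ih ⊢
      apply ih
      simp only [PySem.Int.truncdiv]
      rw [Int.tdiv_eq_ediv]
      have hs : (2 : Int).sign = 1 := rfl
      split_ifs <;> omega

theorem truncdiv_pos (d : Int) (hd : 0 < d) :
    PySem.Int.truncdiv d 2 = PySem.Int.floordiv d 2 := by
  have h1 : PySem.Int.floordiv d 2 = d / 2 := PySem.Int.floordiv_eq_ediv_of_pos (by norm_num)
  have h2 : Int.tdiv d 2 = d / 2 := by rw [Int.tdiv_eq_ediv]; omega
  simpa [PySem.Int.truncdiv, h1] using h2

theorem A_eq_halveLoop : ∀ (nums : List Int) (d : Int),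
    1 < nums.length → func_recrusion nums d = halveLoop nums d := by
  intro nums d
  induction nums, d using func_recrusion.induct with
  | case1 nums d h => intro h2; omega
  | case2 nums d =>
      intro _
      rw [func_recrusion, halveLoop]
      simp
  | case3 nums d h1 h0 ih =>
      intro h2
      rcases lt_or_gt_of_ne h0 with hneg | hpos
      · rw [A_nonpos nums d (le_of_lt hneg), halveLoop, if_neg (by omega)]
      · rw [func_recrusion, if_neg h1, if_neg h0]
        rw [ih (by rw [gapPass_length]; omega)]
        rw [gapPass_eq_flatPass nums d hpos, truncdiv_pos d hpos]
        conv_rhs => rw [halveLoop]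
        rw [if_pos hpos]

-- ===== VERDICT (by name: the statement is the Claim_ definition above) =====
theorem func_recrusion_spec : Claim_equal_func_recrusion := by
  intro nums d _
  unfold Spec_func_recrusion func_recrusion_alt
  by_cases h : nums.length ≤ 1
  · rw [func_recrusion]; simp [h]
  · rw [if_neg h]
    exact A_eq_halveLoop nums d (by omega)
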